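-- pv_equiv track=rewrite | github.com/axel92xd/ayed1-2025-tps | TP3/EJ2.py | generar_matriz_f
-- ===== SOURCE A (Python) =====
-- def generar_matriz_f(n: int) -> list[list[int]]:
--     """
--     Genera una matriz con el triángulo superior-derecho relleno.
--     Pre: n > 0.
--     Post: Devuelve una matriz n x n con el triángulo superior-derecho relleno con números consecutivos.
--     """
--     matriz = [[0] * n for _ in range(n)]
--     contador = 1
--     for i in range(n):
--         for j in range(n - 1, -1, -1):
--             if i + j >= n - 1:
--                 matriz[i][j] = contador
--                 contador += 1
--     return matriz
-- ===== SOURCE B (Python) =====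
-- def generar_matriz_f(n: int) -> list[list[int]]:
--     """
--     Genera una matriz con el triangulo superior-derecho relleno.
--     Closed form: no running counter; each triangle cell's value is computed
--     directly from its coordinates via triangular numbers.
--     """
--     return [[(i * (i + 1) // 2 + (n - 1 - j) + 1) if i + j >= n - 1 else 0
--              for j in range(n)]
--             for i in range(n)]
-- ===== Notes on version B (the rewrite author's own statement) =====
-- stated objective: alternative
-- what changed: Replaced the sequential counter threaded through a mutating double loop by a closed-form per-cell formula based on triangular numbers, so each cell is a pure function of its coordinates and the traversal order no longer matters.
import Mathlib
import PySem

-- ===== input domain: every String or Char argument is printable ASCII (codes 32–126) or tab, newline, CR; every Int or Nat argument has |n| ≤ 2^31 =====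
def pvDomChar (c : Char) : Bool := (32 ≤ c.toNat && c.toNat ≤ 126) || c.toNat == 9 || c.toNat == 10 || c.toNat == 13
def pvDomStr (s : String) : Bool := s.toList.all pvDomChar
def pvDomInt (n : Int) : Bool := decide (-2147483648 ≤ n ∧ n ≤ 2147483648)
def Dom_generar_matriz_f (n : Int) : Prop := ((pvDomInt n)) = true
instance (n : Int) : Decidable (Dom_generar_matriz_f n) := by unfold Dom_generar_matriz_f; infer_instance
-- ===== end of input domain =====

-- B replaces A's running counter threaded through a mutating double loop by a per-cell
-- closed form (triangular numbers); same O(n^2) cost, alternative decomposition.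

-- ===== PORT A =====
def generar_matriz_f (n : Int) : List (List Int) :=
  let matriz := (PySem.List.pyRange 0 n 1).map (fun _ => List.replicate n.toNat (0 : Int))
  let res := (PySem.List.pyRange 0 n 1).foldl (fun st i =>
      (PySem.List.pyRange (n - 1) (-1) (-1)).foldl (fun st2 j =>
        if n - 1 ≤ i + j then
          (st2.1.set i.toNat ((st2.1.getD i.toNat []).set j.toNat st2.2), st2.2 + 1)
        else st2) st) (matriz, (1 : Int))
  res.1

-- ===== PORT B =====
def generar_matriz_f_alt (n : Int) : List (List Int) :=
  (PySem.List.pyRange 0 n 1).map (fun i =>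
    (PySem.List.pyRange 0 n 1).map (fun j =>
      if n - 1 ≤ i + j then PySem.Int.floordiv (i * (i + 1)) 2 + (n - 1 - j) + 1 else 0))

-- ===== PRECONDITION & SPEC =====
def Spec_generar_matriz_f (n : Int) (out : List (List Int)) : Prop := out = generar_matriz_f_alt n
instance (n : Int) (out : List (List Int)) : Decidable (Spec_generar_matriz_f n out) := by unfold Spec_generar_matriz_f; infer_instance

-- ===== CLAIM (what is proved, stated in full; the proofs are below) =====
def Claim_equal_generar_matriz_f : Prop := ∀ (n : Int), Dom_generar_matriz_f n → Spec_generar_matriz_f n (generar_matriz_f n)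

-- ===== LEMMAS AND PROOFS =====

-- proof-side names for A's loop bodies (definitionally equal to the lambdas in the port)
def rstep (n i : Int) (st : List Int × Int) (j : Int) : List Int × Int :=
  if n - 1 ≤ i + j then (st.1.set j.toNat st.2, st.2 + 1) else st

def mstep (n i : Int) (st : List (List Int) × Int) (j : Int) : List (List Int) × Int :=
  if n - 1 ≤ i + j then (st.1.set i.toNat ((st.1.getD i.toNat []).set j.toNat st.2), st.2 + 1) else st

def ostep (n : Int) (st : List (List Int) × Int) (i : Int) : List (List Int) × Int :=
  (PySem.List.pyRange (n - 1) (-1) (-1)).foldl (mstep n i) st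

def matriz0 (n : Int) : List (List Int) :=
  (PySem.List.pyRange 0 n 1).map (fun _ => List.replicate n.toNat (0 : Int))

-- B's value of row r (as a function of the row index, closed form)
def rowB (n : Int) (r : Nat) : List Int :=
  (List.range n.toNat).map (fun (j : Nat) =>
    if n - 1 ≤ (r : Int) + (j : Int) then ((r * (r + 1) / 2 : Nat) : Int) + (n - 1 - (j : Int)) + 1 else 0)

lemma portA_eq (n : Int) :
    generar_matriz_f n = ((PySem.List.pyRange 0 n 1).foldl (ostep n) (matriz0 n, 1)).1 := rfl

lemma getD_range_self {α : Type} (xs : List α) (d : α) :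
    (List.range xs.length).map (fun j => xs.getD j d) = xs := by
  apply List.ext_getElem
  · simp
  · intro i h1 h2
    simp [List.getD, List.getElem?_eq_getElem h2]

lemma set_getD_self {α : Type} (m : List α) (k : Nat) (d : α) (h : k < m.length) :
    m.set k (m.getD k d) = m := by
  apply List.ext_getElem <;> simp [List.getD, List.getElem?_eq_getElem h]

lemma getD_set_self {α : Type} (m : List α) (k : Nat) (r d : α) (h : k < m.length) :
    (m.set k r).getD k d = r := by
  simp [List.getD, h]

lemma getD_set_ne {α : Type} (m : List α) (k j : Nat) (r d : α) (h : j ≠ k) :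
    (m.set k r).getD j d = m.getD j d := by
  simp [List.getD, List.getElem?_set_ne h.symm]

-- the inner loop only touches row i: it is the row-level loop lifted through List.set
lemma lift_inner (n i : Int) (l : List Int) :
    ∀ (m : List (List Int)) (c : Int), i.toNat < m.length →
    l.foldl (mstep n i) (m, c)
      = (m.set i.toNat (l.foldl (rstep n i) (m.getD i.toNat [], c)).1,
         (l.foldl (rstep n i) (m.getD i.toNat [], c)).2) := by
  induction l with
  | nil =>
    intro m c h
    simp only [List.foldl_nil, Prod.mk.injEq]
    exact ⟨(set_getD_self m i.toNat [] h).symm, trivial⟩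
  | cons j l ih =>
    intro m c h
    simp only [List.foldl_cons]
    by_cases hc : n - 1 ≤ i + j
    · simp only [mstep, rstep, if_pos hc]
      rw [ih _ _ (by simpa using h)]
      rw [getD_set_self m i.toNat _ [] h, List.set_set]
    · simp only [mstep, rstep, if_neg hc]
      exact ih m c h

lemma row_loop (n i : Int) (hi0 : 0 ≤ i) (hin : i < n) :
    ∀ (k : Nat) (t : Int), (t + 1).toNat = k → -1 ≤ t → t < n →
    ∀ (row : List Int) (c : Int), row.length = n.toNat →
    (PySem.List.pyRange t (-1) (-1)).foldl (rstep n i) (row, c)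
      = ((List.range n.toNat).map (fun (j : Nat) =>
           if n - 1 - i ≤ (j : Int) ∧ (j : Int) ≤ t then c + (t - (j : Int)) else row.getD j 0),
         c + ((t - (n - 1 - i) + 1).toNat : Int)) := by
  intro k
  induction k with
  | zero =>
    intro t hk h1 h2 row c hlen
    have ht : t = -1 := by omega
    subst ht
    rw [PySem.List.pyRange_neg_one_eq_nil (by omega)]
    simp only [List.foldl_nil, Prod.mk.injEq]
    constructor
    · have hcong : ∀ j ∈ List.range n.toNat,
          (if n - 1 - i ≤ (j : Int) ∧ (j : Int) ≤ (-1 : Int) then c + ((-1 : Int) - (j : Int)) else row.getD j 0)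
            = row.getD j 0 := by
        intro j hj
        rw [if_neg (by omega)]
      rw [List.map_congr_left hcong, ← hlen, getD_range_self]
    · omega
  | succ k ih =>
    intro t hk h1 h2 row c hlen
    have ht0 : 0 ≤ t := by omega
    rw [PySem.List.pyRange_neg_one_cons (by omega : (-1 : Int) < t)]
    simp only [List.foldl_cons]
    by_cases hc : n - 1 ≤ i + t
    · simp only [rstep, if_pos hc]
      rw [ih (t - 1) (by omega) (by omega) (by omega) _ _ (by simpa using hlen)]
      simp only [Prod.mk.injEq]
      constructor
      · apply List.map_congr_left
        intro j hj
        simp only [List.mem_range] at hj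
        have hjn : (j : Int) < n := by omega
        by_cases hjt : (j : Int) = t
        · have hj' : j = t.toNat := by omega
          subst hj'
          rw [if_neg (by omega), if_pos (by constructor <;> omega)]
          rw [getD_set_self row t.toNat c 0 (by omega)]
          omega
        · rw [getD_set_ne row t.toNat j c 0 (by omega)]
          by_cases hcond : n - 1 - i ≤ (j : Int) ∧ (j : Int) ≤ t - 1
          · rw [if_pos hcond, if_pos (by constructor <;> omega)]
            omega
          · rw [if_neg hcond, if_neg (by omega)]
      · omega
    · simp only [rstep, if_neg hc]
      rw [ih (t - 1) (by omega) (by omega) (by omega) row c hlen]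
      simp only [Prod.mk.injEq]
      constructor
      · apply List.map_congr_left
        intro j hj
        simp only [List.mem_range] at hj
        rw [if_neg (by omega), if_neg (by omega)]
      · omega

lemma set_map_range (N : Nat) (f : Nat → List Int) (k : Nat) (v : List Int) :
    ((List.range N).map f).set k v = (List.range N).map (fun r => if r = k then v else f r) := by
  apply List.ext_getElem
  · simp
  · intro i h1 h2
    simp only [List.getElem_set, List.getElem_map, List.getElem_range]
    split <;> split <;> first | rfl | omega

lemma triangle_succ (k : Nat) : (k + 1) * (k + 1 + 1) / 2 = k * (k + 1) / 2 + (k + 1) := by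
  have h : (k + 1) * (k + 1 + 1) = k * (k + 1) + 2 * (k + 1) := by ring
  rw [h, Nat.add_mul_div_left _ _ (by norm_num)]

lemma outer_loop (n : Int) :
    ∀ (k : Nat), (k : Int) ≤ n →
    (PySem.List.pyRange 0 (k : Int) 1).foldl (ostep n) (matriz0 n, 1)
      = ((List.range n.toNat).map (fun r => if r < k then rowB n r else List.replicate n.toNat (0 : Int)),
         ((k * (k + 1) / 2 : Nat) : Int) + 1) := by
  intro k
  induction k with
  | zero =>
    intro _
    rw [show ((0 : Nat) : Int) = 0 by rfl, PySem.List.pyRange_one_eq_nil (le_refl 0)]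
    simp only [List.foldl_nil, Prod.mk.injEq]
    refine ⟨?_, by norm_num⟩
    unfold matriz0
    rw [PySem.List.pyRange_one, List.map_map]
    simp only [sub_zero]
    apply List.map_congr_left
    intro r hr
    simp
  | succ k ih =>
    intro hk1
    have hkn : (k : Int) < n := by push_cast at hk1; omega
    have hkN : k < n.toNat := by omega
    rw [show ((k + 1 : Nat) : Int) = (k : Int) + 1 by push_cast; ring]
    rw [PySem.List.pyRange_one_succ_right (by positivity), List.foldl_append]
    rw [ih (by omega)]
    simp only [List.foldl_cons, List.foldl_nil]
    unfold ostep
    rw [lift_inner n (k : Int) _ _ _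
      (by simp only [List.length_map, List.length_range, Int.toNat_natCast]; omega)]
    simp only [Int.toNat_natCast]
    have hget : ((List.range n.toNat).map (fun r => if r < k then rowB n r else List.replicate n.toNat (0 : Int))).getD k []
        = List.replicate n.toNat (0 : Int) := by
      simp [List.getD, hkN]
    rw [hget]
    rw [row_loop n (k : Int) (Int.natCast_nonneg k) hkn n.toNat (n - 1) (by omega) (by omega) (by omega) _ _ (by simp)]
    rw [set_map_range]
    simp only [Prod.mk.injEq]
    constructor
    · apply List.map_congr_left
      intro r hr
      simp only [List.mem_range] at hr
      by_cases hrk : r = k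
      · subst hrk
        rw [if_pos rfl, if_pos (Nat.lt_succ_self r)]
        unfold rowB
        apply List.map_congr_left
        intro j hj
        simp only [List.mem_range] at hj
        by_cases hcj : n - 1 ≤ (r : Int) + (j : Int)
        · rw [if_pos (by constructor <;> omega), if_pos hcj]
          omega
        · rw [if_neg (by omega), if_neg hcj]
          simp
      · rw [if_neg hrk]
        by_cases hrk2 : r < k
        · rw [if_pos hrk2, if_pos (by omega)]
        · rw [if_neg hrk2, if_neg (by omega)]
    · have h2 := triangle_succ k
      rw [h2]
      push_cast
      omega
  
-- ===== VERDICT (by name: the statement is the Claim_ definition above) =====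
theorem generar_matriz_f_spec : Claim_equal_generar_matriz_f := by
  intro n _
  unfold Spec_generar_matriz_f
  by_cases hn : n ≤ 0
  · simp [generar_matriz_f, generar_matriz_f_alt, PySem.List.pyRange_one_eq_nil hn]
  · push Not at hn
    rw [portA_eq]
    rw [show PySem.List.pyRange 0 n 1 = PySem.List.pyRange 0 ((n.toNat : Nat) : Int) 1 by
      congr 1; omega]
    rw [outer_loop n n.toNat (by omega)]
    unfold generar_matriz_f_alt
    rw [PySem.List.pyRange_one, List.map_map]
    simp only [sub_zero]
    apply List.map_congr_left
    intro r hr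
    simp only [List.mem_range] at hr
    simp only [Function.comp_apply, zero_add, if_pos hr]
    unfold rowB
    rw [List.map_map]
    apply List.map_congr_left
    intro j hj
    simp only [Function.comp_apply]
    have hfd : PySem.Int.floordiv ((r : Int) * ((r : Int) + 1)) 2 = ((r * (r + 1) / 2 : Nat) : Int) := by
      rw [show ((r : Int) * ((r : Int) + 1)) = ((r * (r + 1) : Nat) : Int) by push_cast; ring]
      exact_mod_cast PySem.Int.floordiv_natCast (r * (r + 1)) 2
    rw [hfd]
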